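-- pv_equiv track=rewrite | github.com/jonasrenault/advent2020 | advent2020/day16.py | is_invalid
-- ===== SOURCE A (Python) =====
-- def is_invalid(
--     rules: dict[str, tuple[tuple[int, int], tuple[int, int]]], ticket: list[int]
-- ) -> int:
--     for val in ticket:
--         for a, b in rules.values():
--             if a[0] <= val <= a[1] or b[0] <= val <= b[1]:
--                 break
--         else:
--             return val
--     return 0
-- ===== SOURCE B (Python) =====
-- def is_invalid(rules, ticket):
--     # Preprocess: collect all rule intervals, sort by lower bound, merge
--     # overlaps into a disjoint sorted list; then each ticket value is checked
--     # against the merged list with an early exit once lower bounds exceed it.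
--     intervals = []
--     for a, b in rules.values():
--         intervals.append(a)
--         intervals.append(b)
--     intervals.sort(key=lambda t: t[0])
--     merged = []
--     for lo, hi in intervals:
--         if merged and lo <= merged[-1][1]:
--             if hi > merged[-1][1]:
--                 merged[-1] = (merged[-1][0], hi)
--         else:
--             merged.append((lo, hi))
--     for val in ticket:
--         covered = False
--         for lo, hi in merged:
--             if val < lo:
--                 break
--             if val <= hi:
--                 covered = True
--                 break
--         if not covered:
--             return val
--     return 0
-- ===== Notes on version B (the rewrite author's own statement) =====
-- stated objective: alternative
-- what changed: Instead of scanning every rule's two intervals for each ticket value, B merges all rule intervals once into a sorted disjoint list and checks each value against that list with an early exit.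
import Mathlib
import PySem

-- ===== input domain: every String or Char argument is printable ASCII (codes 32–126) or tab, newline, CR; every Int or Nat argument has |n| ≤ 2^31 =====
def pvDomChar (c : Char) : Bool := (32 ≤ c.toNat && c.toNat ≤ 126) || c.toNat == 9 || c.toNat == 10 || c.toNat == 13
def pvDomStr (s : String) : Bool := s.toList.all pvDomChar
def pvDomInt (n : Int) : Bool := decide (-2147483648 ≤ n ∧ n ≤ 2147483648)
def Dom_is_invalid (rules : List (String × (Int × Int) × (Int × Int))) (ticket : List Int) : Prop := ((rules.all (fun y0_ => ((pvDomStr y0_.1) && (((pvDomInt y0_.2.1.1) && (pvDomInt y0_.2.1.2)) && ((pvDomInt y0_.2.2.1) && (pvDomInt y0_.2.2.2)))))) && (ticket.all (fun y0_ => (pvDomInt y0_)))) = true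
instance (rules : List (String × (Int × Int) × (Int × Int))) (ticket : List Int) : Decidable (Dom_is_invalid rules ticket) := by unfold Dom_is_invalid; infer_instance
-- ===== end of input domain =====

-- B replaces A's per-value scan over all rules by a one-time sort-and-merge of
-- the rule intervals into a disjoint sorted list, checked per value with early exit
-- (objective: alternative algorithm; equivalence of return values proved below).

-- ===== PORT A =====
-- inner 'for a, b in rules.values(): … break / else' — true iff some rule's interval pair covers v
def pvRuleHits (v : Int) : List (String × (Int × Int) × (Int × Int)) → Bool
  | [] => false
  | (_, a, b) :: rest =>
    if (decide (a.1 ≤ v) && decide (v ≤ a.2)) || (decide (b.1 ≤ v) && decide (v ≤ b.2)) then true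
    else pvRuleHits v rest

-- outer 'for val in ticket: … return val' / final 'return 0'
def pvLoopA (rules : List (String × (Int × Int) × (Int × Int))) : List Int → Int
  | [] => 0
  | v :: rest => if pvRuleHits v rules then pvLoopA rules rest else v

def is_invalid (rules : List (String × (Int × Int) × (Int × Int))) (ticket : List Int) : Int :=
  pvLoopA rules ticket

-- ===== PORT B =====
-- merge loop body; the list 'merged' is kept REVERSED (head = Python's merged[-1]);
-- B's final merged list is the reverse of the fold's result
def pvMergeStep (acc : List (Int × Int)) (iv : Int × Int) : List (Int × Int) :=
  match acc with
  | [] => [iv]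
  | (pl, ph) :: rest =>
    if iv.1 ≤ ph then (if ph < iv.2 then (pl, iv.2) :: rest else (pl, ph) :: rest)
    else iv :: (pl, ph) :: rest

-- intervals = both intervals of every rule; intervals.sort(key=lambda t: t[0]); merge loop
def pvMerged (rules : List (String × (Int × Int) × (Int × Int))) : List (Int × Int) :=
  (((PySem.List.sorted (rules.flatMap (fun r => [r.2.1, r.2.2])) (fun t => t.1) false)).foldl
    pvMergeStep []).reverse

-- 'for lo, hi in merged: if val < lo: break; if val <= hi: covered = True; break'
def pvCovScan (v : Int) : List (Int × Int) → Bool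
  | [] => false
  | (lo, hi) :: rest => if v < lo then false else if v ≤ hi then true else pvCovScan v rest

def pvLoopB (ms : List (Int × Int)) : List Int → Int
  | [] => 0
  | v :: rest => if pvCovScan v ms then pvLoopB ms rest else v

def is_invalid_alt (rules : List (String × (Int × Int) × (Int × Int))) (ticket : List Int) : Int :=
  pvLoopB (pvMerged rules) ticket

-- ===== PRECONDITION & SPEC =====
def Spec_is_invalid (rules : List (String × (Int × Int) × (Int × Int))) (ticket : List Int) (out : Int) : Prop := out = is_invalid_alt rules ticket
instance (rules : List (String × (Int × Int) × (Int × Int))) (ticket : List Int) (out : Int) : Decidable (Spec_is_invalid rules ticket out) := by unfold Spec_is_invalid; infer_instance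

-- ===== CLAIM (what is proved, stated in full; the proofs are below) =====
def Claim_equal_is_invalid : Prop := ∀ (rules : List (String × (Int × Int) × (Int × Int))) (ticket : List Int), Dom_is_invalid rules ticket → Spec_is_invalid rules ticket (is_invalid rules ticket)

-- ===== LEMMAS AND PROOFS =====

-- lower bound of the (reversed) merged accumulator's head first component
def pvHeadLB (acc : List (Int × Int)) (m : Int) : Prop :=
  match acc with
  | [] => True
  | (pl, _) :: _ => pl ≤ m

-- A's inner scan is exactly "some flattened interval covers v"
theorem pvRuleHits_iff (v : Int) (rules : List (String × (Int × Int) × (Int × Int))) :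
    pvRuleHits v rules = true ↔
      ∃ iv ∈ rules.flatMap (fun r => [r.2.1, r.2.2]), iv.1 ≤ v ∧ v ≤ iv.2 := by
  induction rules with
  | nil => simp [pvRuleHits]
  | cons r rest ih =>
    obtain ⟨_, a, b⟩ := r
    simp only [pvRuleHits, List.flatMap_cons, List.cons_append, List.nil_append,
      List.exists_mem_cons_iff]
    split_ifs with h
    · simp only [true_iff]
      rcases Bool.or_eq_true_iff.mp h with h' | h'
      · exact Or.inl (by simpa using h')
      · exact Or.inr (Or.inl (by simpa using h'))
    · rw [ih]
      constructor
      · exact fun hx => Or.inr (Or.inr hx)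
      · rintro (hc | hc | hx)
        · exact absurd (by simp [hc.1, hc.2]) h
        · exact absurd (by simp [hc.1, hc.2]) h
        · exact hx

-- one merge step preserves the head lower bound
theorem pvMergeStep_headLB (acc : List (Int × Int)) (x : Int × Int) (m : Int)
    (h1 : x.1 ≤ m) (h2 : pvHeadLB acc x.1) : pvHeadLB (pvMergeStep acc x) m := by
  cases acc with
  | nil => simpa [pvMergeStep, pvHeadLB] using h1
  | cons p r =>
    obtain ⟨pl, ph⟩ := p
    have hplx : pl ≤ x.1 := h2
    simp only [pvMergeStep]
    by_cases hc : x.1 ≤ ph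
    · rw [if_pos hc]
      by_cases hd : ph < x.2
      · rw [if_pos hd]; show pl ≤ m; omega
      · rw [if_neg hd]; show pl ≤ m; omega
    · rw [if_neg hc]; show x.1 ≤ m; omega

-- one merge step preserves coverage
theorem pvMergeStep_cover (v : Int) (acc : List (Int × Int)) (x : Int × Int)
    (hlb : pvHeadLB acc x.1) :
    ((∃ iv ∈ pvMergeStep acc x, iv.1 ≤ v ∧ v ≤ iv.2) ↔
      (∃ iv ∈ acc, iv.1 ≤ v ∧ v ≤ iv.2) ∨ (x.1 ≤ v ∧ v ≤ x.2)) := by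
  cases acc with
  | nil => simp [pvMergeStep]
  | cons p r =>
    obtain ⟨pl, ph⟩ := p
    have hplx : pl ≤ x.1 := hlb
    simp only [pvMergeStep]
    by_cases hc : x.1 ≤ ph
    · rw [if_pos hc]
      by_cases hd : ph < x.2
      · rw [if_pos hd]
        simp only [List.exists_mem_cons_iff]
        constructor
        · rintro (⟨ha, hb⟩ | h)
          · by_cases hv : v ≤ ph
            · exact Or.inl (Or.inl ⟨ha, hv⟩)
            · exact Or.inr ⟨by omega, hb⟩
          · exact Or.inl (Or.inr h)
        · rintro ((⟨ha, hb⟩ | h) | ⟨ha, hb⟩)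
          · exact Or.inl ⟨ha, by omega⟩
          · exact Or.inr h
          · exact Or.inl ⟨by omega, hb⟩
      · rw [if_neg hd]
        simp only [List.exists_mem_cons_iff]
        constructor
        · exact Or.inl
        · rintro ((h | h) | ⟨ha, hb⟩)
          · exact Or.inl h
          · exact Or.inr h
          · exact Or.inl ⟨by omega, by omega⟩
    · rw [if_neg hc]
      simp only [List.exists_mem_cons_iff]
      exact or_comm

-- one merge step keeps the accumulator sorted by descending first component
theorem pvMergeStep_desc (acc : List (Int × Int)) (x : Int × Int)
    (hlb : pvHeadLB acc x.1) (hacc : acc.Pairwise (fun a b => b.1 ≤ a.1)) :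
    (pvMergeStep acc x).Pairwise (fun a b => b.1 ≤ a.1) := by
  cases acc with
  | nil => simp [pvMergeStep]
  | cons p r =>
    obtain ⟨pl, ph⟩ := p
    have hplx : pl ≤ x.1 := hlb
    obtain ⟨hr1, hr2⟩ := List.pairwise_cons.mp hacc
    simp only [pvMergeStep]
    by_cases hc : x.1 ≤ ph
    · rw [if_pos hc]
      by_cases hd : ph < x.2
      · rw [if_pos hd]
        exact List.pairwise_cons.mpr ⟨fun y hy => hr1 y hy, hr2⟩
      · rw [if_neg hd]
        exact hacc
    · rw [if_neg hc]
      refine List.pairwise_cons.mpr ⟨?_, hacc⟩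
      intro y hy
      rcases List.mem_cons.mp hy with rfl | hy
      · exact hplx
      · exact le_trans (hr1 y hy) hplx

-- the merge fold preserves coverage, given the input sorted by first component
theorem pvMerge_cover (v : Int) :
    ∀ (xs acc : List (Int × Int)),
      xs.Pairwise (fun a b => a.1 ≤ b.1) →
      (∀ x ∈ xs, pvHeadLB acc x.1) →
      ((∃ iv ∈ xs.foldl pvMergeStep acc, iv.1 ≤ v ∧ v ≤ iv.2) ↔
        (∃ iv ∈ acc, iv.1 ≤ v ∧ v ≤ iv.2) ∨ (∃ iv ∈ xs, iv.1 ≤ v ∧ v ≤ iv.2)) := by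
  intro xs
  induction xs with
  | nil => intro acc _ _; simp
  | cons x rest ih =>
    intro acc hp hlb
    obtain ⟨hp1, hp2⟩ := List.pairwise_cons.mp hp
    have hx : pvHeadLB acc x.1 := hlb x List.mem_cons_self
    have hlb' : ∀ y ∈ rest, pvHeadLB (pvMergeStep acc x) y.1 := fun y hy =>
      pvMergeStep_headLB acc x y.1 (hp1 y hy) hx
    rw [List.foldl_cons, ih _ hp2 hlb', pvMergeStep_cover v acc x hx,
      List.exists_mem_cons_iff]
    exact or_assoc

-- the fold keeps the accumulator sorted by DESCENDING first component
theorem pvMerge_sorted :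
    ∀ (xs acc : List (Int × Int)),
      xs.Pairwise (fun a b => a.1 ≤ b.1) →
      (∀ x ∈ xs, pvHeadLB acc x.1) →
      acc.Pairwise (fun a b => b.1 ≤ a.1) →
      (xs.foldl pvMergeStep acc).Pairwise (fun a b => b.1 ≤ a.1) := by
  intro xs
  induction xs with
  | nil => intro acc _ _ h; simpa using h
  | cons x rest ih =>
    intro acc hp hlb hacc
    obtain ⟨hp1, hp2⟩ := List.pairwise_cons.mp hp
    have hx : pvHeadLB acc x.1 := hlb x List.mem_cons_self
    exact ih _ hp2 (fun y hy => pvMergeStep_headLB acc x y.1 (hp1 y hy) hx)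
      (pvMergeStep_desc acc x hx hacc)

-- early-exit scan over an ascending list decides coverage
theorem pvCovScan_iff (v : Int) :
    ∀ (ms : List (Int × Int)), ms.Pairwise (fun a b => a.1 ≤ b.1) →
      (pvCovScan v ms = true ↔ ∃ iv ∈ ms, iv.1 ≤ v ∧ v ≤ iv.2) := by
  intro ms
  induction ms with
  | nil => simp [pvCovScan]
  | cons m rest ih =>
    intro hp
    obtain ⟨hp1, hp2⟩ := List.pairwise_cons.mp hp
    obtain ⟨lo, hi⟩ := m
    simp only [pvCovScan, List.exists_mem_cons_iff]
    split_ifs with h1 h2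
    · simp only [false_iff]
      rintro (⟨ha, hb⟩ | ⟨iv, hm, hc⟩)
      · omega
      · have := hp1 iv hm; simp only at this; omega
    · simp only [true_iff]
      exact Or.inl ⟨by omega, by omega⟩
    · rw [ih hp2]
      constructor
      · exact Or.inr
      · rintro (⟨ha, hb⟩ | h)
        · omega
        · exact h

-- the two per-value tests agree
theorem pvCov_eq_hits (rules : List (String × (Int × Int) × (Int × Int))) (v : Int) :
    pvCovScan v (pvMerged rules) = pvRuleHits v rules := by
  have hsorted : (PySem.List.sorted (rules.flatMap (fun r => [r.2.1, r.2.2]))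
      (fun t => t.1) false).Pairwise (fun a b => a.1 ≤ b.1) :=
    PySem.List.sorted_pairwise _ _
  have hlb : ∀ x ∈ (PySem.List.sorted (rules.flatMap (fun r => [r.2.1, r.2.2]))
      (fun t => t.1) false), pvHeadLB ([] : List (Int × Int)) x.1 := by
    intro x _; trivial
  have hcov := pvMerge_cover v _ ([] : List (Int × Int)) hsorted hlb
  have hdesc := pvMerge_sorted _ ([] : List (Int × Int)) hsorted hlb (by simp)
  have hasc : (pvMerged rules).Pairwise (fun a b => a.1 ≤ b.1) := by
    unfold pvMerged
    exact (List.pairwise_reverse).mpr hdesc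
  have hscan := pvCovScan_iff v (pvMerged rules) hasc
  have hhits := pvRuleHits_iff v rules
  have hchain : pvCovScan v (pvMerged rules) = true ↔ pvRuleHits v rules = true := by
    rw [hscan, hhits]
    unfold pvMerged
    constructor
    · rintro ⟨iv, hm, hc⟩
      rcases hcov.mp ⟨iv, List.mem_reverse.mp hm, hc⟩ with ⟨iv', hm', _⟩ | ⟨iv', hm', hc'⟩
      · exact absurd hm' (List.not_mem_nil)
      · exact ⟨iv', (PySem.List.mem_sorted _ _ _ _).mp hm', hc'⟩
    · rintro ⟨iv, hm, hc⟩
      obtain ⟨iv', hm', hc'⟩ :=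
        hcov.mpr (Or.inr ⟨iv, (PySem.List.mem_sorted _ _ _ _).mpr hm, hc⟩)
      exact ⟨iv', List.mem_reverse.mpr hm', hc'⟩
  rcases hb : pvRuleHits v rules with _ | _
  · rcases hc : pvCovScan v (pvMerged rules) with _ | _
    · rfl
    · rw [hchain.mp hc] at hb; exact hb
  · exact hchain.mpr hb

-- the two top-level loops agree pointwise
theorem pvLoop_eq (rules : List (String × (Int × Int) × (Int × Int))) :
    ∀ ticket : List Int, pvLoopA rules ticket = pvLoopB (pvMerged rules) ticket := by
  intro ticket
  induction ticket with
  | nil => rfl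
  | cons v rest ih =>
    simp only [pvLoopA, pvLoopB, pvCov_eq_hits, ih]

-- ===== VERDICT (by name: the statement is the Claim_ definition above) =====
theorem is_invalid_spec : Claim_equal_is_invalid := by
  intro rules ticket _
  unfold Spec_is_invalid is_invalid is_invalid_alt
  exact pvLoop_eq rules ticket
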